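-- pv_equiv track=rewrite | github.com/LisaTho/bookbot | main.py | symbol_count
-- ===== SOURCE A (Python) =====
-- def symbol_count(s): #count the number of each symbol in the string and return as a dictionary
--     count = {}
--     for word in s:
--         for char in word:
--             if char not in count:
--                 count[char] = 1
--             else:
--                 count[char] += 1
--     return count
-- ===== SOURCE B (Python) =====
-- def symbol_count(s):
--     chars = [c for word in s for c in word]
--     return {c: chars.count(c) for c in dict.fromkeys(chars)}
-- ===== Notes on version B (the rewrite author's own statement) =====
-- stated objective: idiomatic
-- what changed: Replaces A's single accumulating dict-update pass with flatten-then-comprehension: first-occurrence-ordered distinct symbols via dict.fromkeys, each counted by a fresh .count scan of the flattened character list.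
import Mathlib
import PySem

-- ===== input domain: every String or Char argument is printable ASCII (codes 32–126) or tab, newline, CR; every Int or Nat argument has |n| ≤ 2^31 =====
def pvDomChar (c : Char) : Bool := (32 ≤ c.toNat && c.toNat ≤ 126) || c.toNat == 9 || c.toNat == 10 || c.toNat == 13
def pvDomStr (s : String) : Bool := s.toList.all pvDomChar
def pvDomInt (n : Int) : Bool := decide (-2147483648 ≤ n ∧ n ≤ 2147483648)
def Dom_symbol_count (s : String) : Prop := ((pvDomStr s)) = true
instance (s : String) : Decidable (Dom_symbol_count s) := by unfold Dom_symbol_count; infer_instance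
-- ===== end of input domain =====

-- B replaces A's accumulating dict-update pass with dedup-then-repeated-count (idiomatic, not faster).

-- ===== PORT A =====
-- for word in s: for char in word: dict update.  Iterating a Python char yields itself: inner loop is a fold over [word].
def symbol_count (s : String) : List (String × Int) :=
  (s.toList.foldl (fun (count : PySem.Dict String Int) word =>
    [word].foldl (fun count ch =>
      let k := String.ofList [ch]
      if count.contains k then count.insert k (count.getD k 0 + 1)
      else count.insert k 1) count) PySem.Dict.empty).items

-- ===== PORT B =====
-- chars = [c for word in s for c in word]; {c: chars.count(c) for c in dict.fromkeys(chars)}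
def symbol_count_alt (s : String) : List (String × Int) :=
  let chars := s.toList.flatMap (fun word => [word])
  (PySem.List.dedup chars).map (fun c => (String.ofList [c], (PySem.List.count chars c : Int)))

-- ===== PRECONDITION & SPEC =====
def Spec_symbol_count (s : String) (out : List (String × Int)) : Prop := out = symbol_count_alt s
instance (s : String) (out : List (String × Int)) : Decidable (Spec_symbol_count s out) := by unfold Spec_symbol_count; infer_instance

-- ===== CLAIM (what is proved, stated in full; the proofs are below) =====
def Claim_equal_symbol_count : Prop := ∀ (s : String), Dom_symbol_count s → Spec_symbol_count s (symbol_count s)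

-- ===== LEMMAS AND PROOFS =====

theorem pv_key_inj : Function.Injective (fun c : Char => String.ofList [c]) := by
  intro a b h
  simpa using congrArg String.toList h

theorem pv_ofList_map {α β : Type} [DecidableEq α] [DecidableEq β] (f : α → β)
    (hf : Function.Injective f) (l : List α) :
    PySem.Set.ofList (l.map f) = (PySem.Set.ofList l).map f := by
  induction l using List.reverseRecOn with
  | nil => rfl
  | append_singleton xs x ih =>
      simp only [List.map_append, List.map_cons, List.map_nil,
        PySem.Set.ofList_append_singleton, ih]
      have hmem := PySem.Set.mem_ofList xs x
      by_cases hx : x ∈ PySem.Set.ofList xs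
      · simp [PySem.Set.add, hx, hmem.mp hx, List.mem_map, hf.eq_iff]
      · simp [PySem.Set.add, hx, List.mem_map, hf.eq_iff]
        exact fun hm => hx (hmem.mpr hm)

theorem symbol_count_spec : Claim_equal_symbol_count := by
  intro s _
  unfold Spec_symbol_count symbol_count symbol_count_alt
  simp only [List.foldl_cons, List.foldl_nil, List.flatMap_singleton']
  -- A's step equals the counter step, keyed by k
  have hstep : ∀ (d : PySem.Dict String Int) (ch : Char),
      (let k := String.ofList [ch];
        if d.contains k then d.insert k (d.getD k 0 + 1) else d.insert k 1)
      = d.insert (String.ofList [ch]) (d.getD (String.ofList [ch]) 0 + 1) := by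
    intro d ch
    by_cases h : d.contains (String.ofList [ch])
    · simp [h]
    · rw [if_neg h, PySem.Dict.getD_of_not_contains _ _ (by simpa using h)]
      norm_num
  have hA : s.toList.foldl (fun (count : PySem.Dict String Int) ch =>
        let k := String.ofList [ch]
        if count.contains k then count.insert k (count.getD k 0 + 1)
        else count.insert k 1) PySem.Dict.empty
      = PySem.Dict.counter (s.toList.map (fun c => String.ofList [c])) := by
    rw [PySem.List.foldl_congr_mem _ _ _ _ (fun acc x _ => hstep acc x)]
    rw [← PySem.Dict.foldl_insert_getD_add_one_eq_counter, List.foldl_map]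
  rw [hA, PySem.Dict.items_counter,
    pv_ofList_map _ pv_key_inj, List.map_map]
  apply List.map_congr_left
  intro c _
  simp only [Function.comp]
  congr 1
  rw [List.count_map_of_injective _ _ pv_key_inj, PySem.List.count_eq]
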